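/- GENERATED by mk_final_copies.py from the proof of the farm's unit `start_decoder.2c` (farm:start_decoder.2c.1: Proof.lean) as the
   re-elaboration sweep compiled it — do not edit. -/
import Asan.CheckWalk
import Vorbis.Spec.StartDecoderATest
import Vorbis.Spec.StartDecoderBTest
import Vorbis.Spec.Reader
import Vorbis.Spec.Units.start_decoder_2c

open X86 X86.User Asan Vorbis Vorbis.Spec Vorbis.Spec.StartDecoder Vorbis.Spec.StartDecoder.P2

namespace Vorbis.Spec.start_decoder_2c

set_option maxRecDepth 4000 in
set_option maxHeartbeats 4000000 in
/-- **Stage 1 of segment `.2c`** (0x113ad1 … 0x113b0f + 0x113bbc … 0x113bbf, lines 3625 – 3632): getn's result and the six bytes of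
`header` compared with "fishea" (each mismatch: the stub 0x113b15, no store since the point); a match: `get8(f)` returns into 0x113bc4
(`cut9`) with a point there. -/
theorem stage1 {Lay : Layout} (hLay : Lay.hi = 0x1000000) {μ : Microarch} (hμ : UserX.MicroOK μ) {u₀ : State}
    (hcode : HasCodeNat Lay u₀ Vorbis.L.start_decoder.entry Vorbis.Code.code_start_decoder.nat Vorbis.L.start_decoder.size)
    (hget8 : ∀ (others : List Obj) (frames : List (Nat × FrameLayout)) (Blk : Block → Prop) (len : Nat),
      Calls Lay μ Vorbis.WayInv (Vorbis.conv u₀) Vorbis.L.get8.entry (Vorbis.Spec.get8.spec others frames Blk len))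
    {g : Ghost} {A : Arena × List Obj} {v : State} (hpt : Pt u₀ g A Vorbis.L.start_decoder.cut3 v) :
    ReachVia Lay μ Vorbis.WayInv v (fun w => AtStub u₀ g A w ∨ Pt u₀ g A Vorbis.L.start_decoder.cut9 w) := by
  have geo := hpt.geo
  obtain ⟨gr, gr8, glo, ghi, gobj, gobjLo, gobjHi, glog⟩ := geo
  have hfr := hpt.frame
  have w_rip := hfr.rip
  have hRn : (v.reg .rsp).toNat = g.R := by
    rw [hfr.rsp]
    exact toNat_addr _ (by omega)
  have haf : (addr g.f).toNat = g.f := toNat_addr _ (by omega)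
  have hrbp := hpt.rbp
  have w_eq : Mem.EqOn Vorbis.L.textLo Vorbis.L.textHi u₀.mem v.mem := hfr.code
  have hdf : v.flags .df = false := (show abiInv _ from hfr.inv).1
  have hmx : v.mxcsr &&& 0x1F80 = 0x1F80 := (show abiInv _ from hfr.inv).2
  have hsse := Vorbis.sseOK_of_abiInv hfr.inv
  have hg8 := hget8 A.2 g.frames' (g.Blk A) g.len
  u_walk hcode [hμ.vendor] until [Vorbis.L.start_decoder.at_113b15, Vorbis.L.start_decoder.at_113bdc] span [Vorbis.L.textLo, Vorbis.L.textHi] side (v_side)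
  · -- call_inv
    v_inv
  · -- get8's precondition: `ReaderPre` (the shadow clause below the call, the environment, `Bits` over the own stores)
    have hun : ShadowUntouched v.mem s_113bbf.mem := by v_untouched
    have hso : Mem.SameExcept [⟨(v.reg .rsp).toNat - 408, (v.reg .rsp).toNat⟩, ⟨(v.reg .rsp).toNat + 16, (v.reg .rsp).toNat + 17⟩,
        ⟨(v.reg .rsp).toNat + 32, (v.reg .rsp).toNat + 36⟩, ⟨g.f + 1749, g.f + 1750⟩, ⟨g.f + 136, g.f + 144⟩]
        v.mem s_113bbf.mem := by
      u_same
    rw [hRn] at hso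
    obtain ⟨hb1, _⟩ := own_stores hpt.geo hpt.inv.bits hso (ownWins_ok g hpt.geo)
    have e : (s_113bbf.reg .rdi).toNat = g.f := by
      rw [w_rdi]
      exact haf
    refine ⟨shadowPre_call hfr ?_ hun, ?_, ?_⟩
    · rw [w_rsp]
      u_omega
    · rw [e]
      exact readerEnv hpt.hand hpt.inv.env.live
    · rw [e]
      exact hb1
  · -- a branch to the stub: no store since the point
    refine ReachVia.done (Or.inl ⟨_, Or.inl rfl, ?_⟩)
    exact hpt.same_mem w_rip (w_kept.get .rsp rfl) (w_kept.get .rbp rfl) (by v_inv) w_mem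
  · -- a branch to the stub: no store since the point
    refine ReachVia.done (Or.inl ⟨_, Or.inl rfl, ?_⟩)
    exact hpt.same_mem w_rip (w_kept.get .rsp rfl) (w_kept.get .rbp rfl) (by v_inv) w_mem
  · -- a branch to the stub: no store since the point
    refine ReachVia.done (Or.inl ⟨_, Or.inl rfl, ?_⟩)
    exact hpt.same_mem w_rip (w_kept.get .rsp rfl) (w_kept.get .rbp rfl) (by v_inv) w_mem
  · -- a branch to the stub: no store since the point
    refine ReachVia.done (Or.inl ⟨_, Or.inl rfl, ?_⟩)
    exact hpt.same_mem w_rip (w_kept.get .rsp rfl) (w_kept.get .rbp rfl) (by v_inv) w_mem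
  · -- a branch to the stub: no store since the point
    refine ReachVia.done (Or.inl ⟨_, Or.inl rfl, ?_⟩)
    exact hpt.same_mem w_rip (w_kept.get .rsp rfl) (w_kept.get .rbp rfl) (by v_inv) w_mem
  · -- a branch to the stub: no store since the point
    refine ReachVia.done (Or.inl ⟨_, Or.inl rfl, ?_⟩)
    exact hpt.same_mem w_rip (w_kept.get .rsp rfl) (w_kept.get .rbp rfl) (by v_inv) w_mem
  · -- the return of get8: the next point, over the return address and get8's footprint
    v_after_call w_rsp_113bbf w_mem_113bbf
    simp only [w_rdi_113bbf, haf] at w_same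
    have hpost : Get8Post (g.Blk A) g.len (s_113bbf.reg .rdi).toNat s_113bbf s_113bbfr := w_post
    have e : (s_113bbf.reg .rdi).toNat = g.f := by
      rw [w_rdi_113bbf]
      exact haf
    rw [e] at hpost
    have hs : Mem.SameExcept [⟨(v.reg .rsp).toNat - 408, (v.reg .rsp).toNat⟩, ⟨(v.reg .rsp).toNat + 16, (v.reg .rsp).toNat + 17⟩,
        ⟨(v.reg .rsp).toNat + 32, (v.reg .rsp).toNat + 36⟩, ⟨(v.reg .rsp).toNat + 160, (v.reg .rsp).toNat + 166⟩,
        ⟨g.f + 48, g.f + 56⟩, ⟨g.f + 84, g.f + 96⟩, ⟨g.f + 136, g.f + 144⟩, ⟨g.f + 1484, g.f + 1748⟩,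
        ⟨g.f + 1752, g.f + 1756⟩, ⟨g.f + 1776, g.f + 1784⟩] v.mem s_113bbfr.mem := by
      u_same
    rw [hRn] at hs
    have hun : ShadowUntouched v.mem s_113bbfr.mem := by v_untouched
    refine ReachVia.done (Or.inr ?_)
    exact hpt.step w_rip w_rsp (w_kept.get .rbp rfl) w_eq w_inv hs (allWins_ok g hpt.geo) hun hpost.reader.bits
  · -- a branch to the stub: no store since the point
    refine ReachVia.done (Or.inl ⟨_, Or.inl rfl, ?_⟩)
    exact hpt.same_mem w_rip (w_kept.get .rsp rfl) (w_kept.get .rbp rfl) (by v_inv) w_mem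

set_option maxRecDepth 4000 in
set_option maxHeartbeats 4000000 in
/-- **Stage 2 of segment `.2c`** (0x113bc4 … 0x113bcf, lines 3632 – 3633): `get8(f) != 'd'` → the stub 0x113b15; otherwise the second
`get8(f)` returns into 0x113bd4 (`cut10`) with a point there. -/
theorem stage2 {Lay : Layout} (hLay : Lay.hi = 0x1000000) {μ : Microarch} (hμ : UserX.MicroOK μ) {u₀ : State}
    (hcode : HasCodeNat Lay u₀ Vorbis.L.start_decoder.entry Vorbis.Code.code_start_decoder.nat Vorbis.L.start_decoder.size)
    (hget8 : ∀ (others : List Obj) (frames : List (Nat × FrameLayout)) (Blk : Block → Prop) (len : Nat),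
      Calls Lay μ Vorbis.WayInv (Vorbis.conv u₀) Vorbis.L.get8.entry (Vorbis.Spec.get8.spec others frames Blk len))
    {g : Ghost} {A : Arena × List Obj} {v : State} (hpt : Pt u₀ g A Vorbis.L.start_decoder.cut9 v) :
    ReachVia Lay μ Vorbis.WayInv v (fun w => AtStub u₀ g A w ∨ Pt u₀ g A Vorbis.L.start_decoder.cut10 w) := by
  have geo := hpt.geo
  obtain ⟨gr, gr8, glo, ghi, gobj, gobjLo, gobjHi, glog⟩ := geo
  have hfr := hpt.frame
  have w_rip := hfr.rip
  have hRn : (v.reg .rsp).toNat = g.R := by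
    rw [hfr.rsp]
    exact toNat_addr _ (by omega)
  have haf : (addr g.f).toNat = g.f := toNat_addr _ (by omega)
  have hrbp := hpt.rbp
  have w_eq : Mem.EqOn Vorbis.L.textLo Vorbis.L.textHi u₀.mem v.mem := hfr.code
  have hdf : v.flags .df = false := (show abiInv _ from hfr.inv).1
  have hmx : v.mxcsr &&& 0x1F80 = 0x1F80 := (show abiInv _ from hfr.inv).2
  have hsse := Vorbis.sseOK_of_abiInv hfr.inv
  have hg8 := hget8 A.2 g.frames' (g.Blk A) g.len
  u_walk hcode [hμ.vendor] until [Vorbis.L.start_decoder.at_113b15, Vorbis.L.start_decoder.at_113bdc] span [Vorbis.L.textLo, Vorbis.L.textHi] side (v_side)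
  · -- call_inv
    v_inv
  · -- get8's precondition: `ReaderPre` (the shadow clause below the call, the environment, `Bits` over the own stores)
    have hun : ShadowUntouched v.mem s_113bcf.mem := by v_untouched
    have hso : Mem.SameExcept [⟨(v.reg .rsp).toNat - 408, (v.reg .rsp).toNat⟩, ⟨(v.reg .rsp).toNat + 16, (v.reg .rsp).toNat + 17⟩,
        ⟨(v.reg .rsp).toNat + 32, (v.reg .rsp).toNat + 36⟩, ⟨g.f + 1749, g.f + 1750⟩, ⟨g.f + 136, g.f + 144⟩]
        v.mem s_113bcf.mem := by
      u_same
    rw [hRn] at hso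
    obtain ⟨hb1, _⟩ := own_stores hpt.geo hpt.inv.bits hso (ownWins_ok g hpt.geo)
    have e : (s_113bcf.reg .rdi).toNat = g.f := by
      rw [w_rdi]
      exact haf
    refine ⟨shadowPre_call hfr ?_ hun, ?_, ?_⟩
    · rw [w_rsp]
      u_omega
    · rw [e]
      exact readerEnv hpt.hand hpt.inv.env.live
    · rw [e]
      exact hb1
  · -- a branch to the stub: no store since the point
    refine ReachVia.done (Or.inl ⟨_, Or.inl rfl, ?_⟩)
    exact hpt.same_mem w_rip (w_kept.get .rsp rfl) (w_kept.get .rbp rfl) (by v_inv) w_mem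
  · -- the return of get8: the next point, over the return address and get8's footprint
    v_after_call w_rsp_113bcf w_mem_113bcf
    simp only [w_rdi_113bcf, haf] at w_same
    have hpost : Get8Post (g.Blk A) g.len (s_113bcf.reg .rdi).toNat s_113bcf s_113bcfr := w_post
    have e : (s_113bcf.reg .rdi).toNat = g.f := by
      rw [w_rdi_113bcf]
      exact haf
    rw [e] at hpost
    have hs : Mem.SameExcept [⟨(v.reg .rsp).toNat - 408, (v.reg .rsp).toNat⟩, ⟨(v.reg .rsp).toNat + 16, (v.reg .rsp).toNat + 17⟩,
        ⟨(v.reg .rsp).toNat + 32, (v.reg .rsp).toNat + 36⟩, ⟨(v.reg .rsp).toNat + 160, (v.reg .rsp).toNat + 166⟩,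
        ⟨g.f + 48, g.f + 56⟩, ⟨g.f + 84, g.f + 96⟩, ⟨g.f + 136, g.f + 144⟩, ⟨g.f + 1484, g.f + 1748⟩,
        ⟨g.f + 1752, g.f + 1756⟩, ⟨g.f + 1776, g.f + 1784⟩] v.mem s_113bcfr.mem := by
      u_same
    rw [hRn] at hs
    have hun : ShadowUntouched v.mem s_113bcfr.mem := by v_untouched
    refine ReachVia.done (Or.inr ?_)
    exact hpt.step w_rip w_rsp (w_kept.get .rbp rfl) w_eq w_inv hs (allWins_ok g hpt.geo) hun hpost.reader.bits

set_option maxRecDepth 4000 in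
set_option maxHeartbeats 4000000 in
/-- **Stage 3 of segment `.2c`** (0x113bd4 … 0x113bd6, lines 3633 – 3636): `get8(f) != 0` → the stub 0x113b15
(invalid_first_page); otherwise the stub 0x113bdc (ogg_skeleton_not_supported). -/
theorem stage3 {Lay : Layout} (hLay : Lay.hi = 0x1000000) {μ : Microarch} (hμ : UserX.MicroOK μ) {u₀ : State}
    (hcode : HasCodeNat Lay u₀ Vorbis.L.start_decoder.entry Vorbis.Code.code_start_decoder.nat Vorbis.L.start_decoder.size)
    (hget8 : ∀ (others : List Obj) (frames : List (Nat × FrameLayout)) (Blk : Block → Prop) (len : Nat),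
      Calls Lay μ Vorbis.WayInv (Vorbis.conv u₀) Vorbis.L.get8.entry (Vorbis.Spec.get8.spec others frames Blk len))
    {g : Ghost} {A : Arena × List Obj} {v : State} (hpt : Pt u₀ g A Vorbis.L.start_decoder.cut10 v) :
    ReachVia Lay μ Vorbis.WayInv v (fun w => AtStub u₀ g A w) := by
  have geo := hpt.geo
  obtain ⟨gr, gr8, glo, ghi, gobj, gobjLo, gobjHi, glog⟩ := geo
  have hfr := hpt.frame
  have w_rip := hfr.rip
  have hRn : (v.reg .rsp).toNat = g.R := by
    rw [hfr.rsp]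
    exact toNat_addr _ (by omega)
  have haf : (addr g.f).toNat = g.f := toNat_addr _ (by omega)
  have hrbp := hpt.rbp
  have w_eq : Mem.EqOn Vorbis.L.textLo Vorbis.L.textHi u₀.mem v.mem := hfr.code
  have hdf : v.flags .df = false := (show abiInv _ from hfr.inv).1
  have hmx : v.mxcsr &&& 0x1F80 = 0x1F80 := (show abiInv _ from hfr.inv).2
  have hsse := Vorbis.sseOK_of_abiInv hfr.inv
  have hg8 := hget8 A.2 g.frames' (g.Blk A) g.len
  u_walk hcode [hμ.vendor] until [Vorbis.L.start_decoder.at_113b15, Vorbis.L.start_decoder.at_113bdc] span [Vorbis.L.textLo, Vorbis.L.textHi] side (v_side)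
  · -- a branch to the stub: no store since the point
    refine ReachVia.done (⟨_, Or.inl rfl, ?_⟩)
    exact hpt.same_mem w_rip (w_kept.get .rsp rfl) (w_kept.get .rbp rfl) (by v_inv) w_mem
  · -- a branch to the stub: no store since the point
    refine ReachVia.done (⟨_, Or.inr (Or.inr (Or.inr (Or.inr (Or.inr (Or.inl rfl))))), ?_⟩)
    exact hpt.same_mem w_rip (w_kept.get .rsp rfl) (w_kept.get .rbp rfl) (by v_inv) w_mem

/-- **Segment `.2c`** (0x113ad1 … 0x113b0f + 0x113bbc … 0x113bd6, the fishead diagnosis): the three stages in a row; every path ends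
at the stub 0x113b15 or at the stub 0x113bdc, with a point `Pt` there. -/
theorem seg2c {Lay : Layout} (hLay : Lay.hi = 0x1000000) {μ : Microarch} (hμ : UserX.MicroOK μ) {u₀ : State}
    (hcode : HasCodeNat Lay u₀ Vorbis.L.start_decoder.entry Vorbis.Code.code_start_decoder.nat Vorbis.L.start_decoder.size)
    (hget8 : ∀ (others : List Obj) (frames : List (Nat × FrameLayout)) (Blk : Block → Prop) (len : Nat),
      Calls Lay μ Vorbis.WayInv (Vorbis.conv u₀) Vorbis.L.get8.entry (Vorbis.Spec.get8.spec others frames Blk len))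
    {g : Ghost} {A : Arena × List Obj} {v : State} (hpt : Pt u₀ g A Vorbis.L.start_decoder.cut3 v) :
    ReachVia Lay μ Vorbis.WayInv v (fun w => AtStub u₀ g A w) := by
  refine (stage1 hLay hμ hcode hget8 hpt).trans ?_
  intro v1 h1
  rcases h1 with hstub | hpt9
  · exact ReachVia.done hstub
  · refine (stage2 hLay hμ hcode hget8 hpt9).trans ?_
    intro v2 h2
    rcases h2 with hstub | hpt10
    · exact ReachVia.done hstub
    · exact stage3 hLay hμ hcode hget8 hpt10

end Vorbis.Spec.start_decoder_2c

/-- Unit `start_decoder.2c`: segment 2c of `start_decoder` takes the point at `cut3` to a point at a stub. -/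
theorem Vorbis.Spec.Worked.start_decoder_2c_ok : Vorbis.Spec.start_decoder_2c.Statement := by
  intro Lay hLay μ hμ u₀ hcode hget8 g A v hpt
  exact Vorbis.Spec.start_decoder_2c.seg2c hLay hμ hcode hget8 hpt
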